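-- pv_equiv track=rewrite | github.com/YoussefKhafaga/Connect4 | Main.py | getdiagonalscore
-- ===== SOURCE A (Python) =====
-- def getdiagonalscore(row, column, board, value):
--     score = 0
--     connection = 0
--     while row < 6 and column < 7:
--         if board[row][column] == value:
--             connection += 1
--             if connection == 4:
--                 score += 1
--         else:
--             connection = 0
--         row += 1
--         column += 1
--     return score
-- ===== SOURCE B (Python) =====
-- def getdiagonalscore(row, column, board, value):
--     # Collect the diagonal cells, then count maximal runs equal to value of length >= 4.
--     diag = []
--     r, c = row, column
--     while r < 6 and c < 7:
--         diag.append(board[r][c])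
--         r += 1
--         c += 1
--     score = 0
--     while diag:
--         run = 1
--         while run < len(diag) and diag[run] == diag[0]:
--             run += 1
--         if diag[0] == value and run >= 4:
--             score += 1
--         diag = diag[run:]
--     return score
-- ===== Notes on version B (the rewrite author's own statement) =====
-- stated objective: alternative
-- what changed: A keeps a running connection counter inline in one traversal; B first materialises the diagonal as a list and then counts its maximal runs equal to value of length >= 4 by a run-length scan.
import Mathlib
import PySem

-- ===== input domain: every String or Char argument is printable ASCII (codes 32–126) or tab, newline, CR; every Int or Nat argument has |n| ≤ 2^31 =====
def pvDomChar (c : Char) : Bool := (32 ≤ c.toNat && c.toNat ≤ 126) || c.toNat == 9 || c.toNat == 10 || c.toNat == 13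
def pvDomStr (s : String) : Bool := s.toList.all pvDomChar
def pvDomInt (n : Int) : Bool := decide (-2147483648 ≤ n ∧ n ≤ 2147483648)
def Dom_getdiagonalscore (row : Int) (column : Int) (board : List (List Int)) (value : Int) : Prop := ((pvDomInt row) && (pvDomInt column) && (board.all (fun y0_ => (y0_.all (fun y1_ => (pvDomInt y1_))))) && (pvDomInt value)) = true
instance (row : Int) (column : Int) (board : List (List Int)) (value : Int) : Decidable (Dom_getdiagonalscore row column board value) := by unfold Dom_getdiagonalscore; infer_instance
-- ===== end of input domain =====

-- B replaces A's inline running-connection counter with build-the-diagonal-list then a run-length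
-- scan counting maximal runs of `value` of length ≥ 4 (objective: alternative decomposition).

-- ===== PORT A =====
-- while row < 6 and column < 7: read board[row][column]; update connection/score; step row,column.
-- fuel = number of remaining loop iterations (min (6-row) (7-column)), exact for the guard.
def pvLoopA (fuel : Nat) (row column : Int) (board : List (List Int)) (value : Int)
    (score connection : Int) : Int :=
  match fuel with
  | 0 => score
  | f + 1 =>
    if row < 6 ∧ column < 7 then
      -- board[row][column]; exact where Python does not raise (Pre_ below excludes raises)
      let x := PySem.List.pyGetD (PySem.List.pyGetD board row []) column 0
      if x = value then
        let conn := connection + 1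
        pvLoopA f (row + 1) (column + 1) board value (if conn = 4 then score + 1 else score) conn
      else
        pvLoopA f (row + 1) (column + 1) board value score 0
    else score

def getdiagonalscore (row : Int) (column : Int) (board : List (List Int)) (value : Int) : Int :=
  pvLoopA (min (6 - row) (7 - column)).toNat row column board value 0 0

-- ===== PORT B =====
-- phase 1 of Source B: collect the diagonal cells into a list (same while guard, same reads)
def pvCollect (fuel : Nat) (row column : Int) (board : List (List Int)) : List Int :=
  match fuel with
  | 0 => []
  | f + 1 =>
    if row < 6 ∧ column < 7 then
      PySem.List.pyGetD (PySem.List.pyGetD board row []) column 0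
        :: pvCollect f (row + 1) (column + 1) board
    else []

-- inner while of Source B: run = 1 + (number of following cells equal to diag[0])
def pvCountRun (x : Int) : List Int → Nat
  | [] => 0
  | y :: ys => if y = x then pvCountRun x ys + 1 else 0

-- outer while of Source B: score a maximal run, then diag = diag[run:]
def pvRunScan (value : Int) : List Int → Int
  | [] => 0
  | x :: xs =>
    let run := pvCountRun x xs + 1
    (if x = value ∧ 4 ≤ run then 1 else 0) + pvRunScan value (List.drop (run - 1) xs)
termination_by l => l.length
decreasing_by simp

def getdiagonalscore_alt (row : Int) (column : Int) (board : List (List Int)) (value : Int) : Int :=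
  pvRunScan value (pvCollect (min (6 - row) (7 - column)).toNat row column board)

-- ===== PRECONDITION & SPEC =====
-- Pre_ excludes exactly the inputs on which Python A raises IndexError: some visited diagonal
-- cell board[row+k][column+k] is out of range (Python negative-index semantics included).
def Pre_getdiagonalscore (row : Int) (column : Int) (board : List (List Int)) (value : Int) : Prop :=
  ∀ k ∈ List.range (board.length + 13), (row + (k : Int) < 6 ∧ column + (k : Int) < 7) →
    (((PySem.List.pyGet? board (row + (k : Int))).bind
        (fun r => PySem.List.pyGet? r (column + (k : Int)))).isSome = true)

instance (row : Int) (column : Int) (board : List (List Int)) (value : Int) : Decidable (Pre_getdiagonalscore row column board value) := by unfold Pre_getdiagonalscore; infer_instance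

def pvWitness_getdiagonalscore : Int × Int × List (List Int) × Int :=
  (0, 0, [[1,1,1,1,0,0,0],[0,1,1,1,1,0,0],[0,0,1,1,1,1,0],[0,0,0,1,1,1,1],[0,0,0,0,1,1,1],[0,0,0,0,0,1,1]], 1)

def Spec_getdiagonalscore (row : Int) (column : Int) (board : List (List Int)) (value : Int) (out : Int) : Prop := out = getdiagonalscore_alt row column board value
instance (row : Int) (column : Int) (board : List (List Int)) (value : Int) (out : Int) : Decidable (Spec_getdiagonalscore row column board value out) := by unfold Spec_getdiagonalscore; infer_instance

-- ===== CLAIM (what is proved, stated in full; the proofs are below) =====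
def Claim_equal_getdiagonalscore : Prop := ∀ (row : Int) (column : Int) (board : List (List Int)) (value : Int), Dom_getdiagonalscore row column board value → Pre_getdiagonalscore row column board value → Spec_getdiagonalscore row column board value (getdiagonalscore row column board value)

-- ===== LEMMAS AND PROOFS =====

-- A's loop body as a fold step over the diagonal cell values
def pvStepA (value : Int) (p : Int × Int) (x : Int) : Int × Int :=
  if x = value then (if p.2 + 1 = 4 then p.1 + 1 else p.1, p.2 + 1) else (p.1, 0)

theorem pvLoopA_eq_foldl (board : List (List Int)) (value : Int) :
    ∀ (fuel : Nat) (row column score connection : Int),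
      pvLoopA fuel row column board value score connection =
        (List.foldl (pvStepA value) (score, connection) (pvCollect fuel row column board)).1 := by
  intro fuel
  induction fuel with
  | zero => intro _ _ _ _; simp [pvLoopA, pvCollect]
  | succ f ih =>
    intro row column score connection
    simp only [pvLoopA, pvCollect]
    by_cases h : row < 6 ∧ column < 7
    · simp only [h, List.foldl_cons]
      by_cases hx : PySem.List.pyGetD (PySem.List.pyGetD board row []) column 0 = value
      · simp [hx, ih, pvStepA]
      · simp [hx, ih, pvStepA]
    · simp [h]

theorem pvFoldl_fst_shift (value : Int) :
    ∀ (l : List Int) (s c : Int),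
      (List.foldl (pvStepA value) (s, c) l).1 = s + (List.foldl (pvStepA value) (0, c) l).1 := by
  intro l
  induction l with
  | nil => intro s c; simp
  | cons x l ih =>
    intro s c
    simp only [List.foldl_cons, pvStepA]
    by_cases hx : x = value
    · simp only [hx, ite_true]
      rw [ih, ih (if c + 1 = 4 then (0:Int) + 1 else 0) (c + 1)]
      split_ifs <;> omega
    · simp only [hx, ite_false]
      rw [ih, ih 0]

theorem pvFoldl_run (value : Int) :
    ∀ (l : List Int), (∀ y ∈ l, y = value) → ∀ (r : List Int) (s c : Int),
      List.foldl (pvStepA value) (s, c) (l ++ r) =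
        List.foldl (pvStepA value)
          ((if c < 4 ∧ 4 ≤ c + (l.length : Int) then s + 1 else s), c + (l.length : Int)) r := by
  intro l
  induction l with
  | nil =>
    intro _ r s c
    simp only [List.nil_append, List.length_nil, Nat.cast_zero, add_zero]
    rw [if_neg (by omega)]
  | cons x l ih =>
    intro h r s c
    have hx : x = value := h x (by simp)
    subst hx
    simp only [List.cons_append, List.foldl_cons, pvStepA, ite_true]
    rw [ih (fun y hy => h y (List.mem_cons_of_mem _ hy))]
    congr 1
    simp only [List.length_cons, Prod.mk.injEq]
    push_cast
    constructor
    · split_ifs <;> omega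
    · ring

theorem pvFoldl_nonval (value : Int) :
    ∀ (l : List Int), (∀ y ∈ l, y ≠ value) → ∀ (r : List Int) (s : Int),
      List.foldl (pvStepA value) (s, 0) (l ++ r) = List.foldl (pvStepA value) (s, 0) r := by
  intro l
  induction l with
  | nil => intro _ r s; simp
  | cons x l ih =>
    intro h r s
    have hx : x ≠ value := h x (by simp)
    simp only [List.cons_append, List.foldl_cons, pvStepA, hx, ite_false]
    exact ih (fun y hy => h y (List.mem_cons_of_mem _ hy)) r s

theorem pvFoldl_reset (value : Int) (h : Int) (t : List Int) (hne : h ≠ value) (s c : Int) :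
    List.foldl (pvStepA value) (s, c) (h :: t) = List.foldl (pvStepA value) (s, 0) (h :: t) := by
  simp [pvStepA, hne]

theorem pvCountRun_le (x : Int) : ∀ (xs : List Int), pvCountRun x xs ≤ xs.length := by
  intro xs
  induction xs with
  | nil => simp [pvCountRun]
  | cons y ys ih => simp only [pvCountRun, List.length_cons]; split_ifs <;> omega

theorem pvCountRun_take (x : Int) :
    ∀ (xs : List Int), ∀ y ∈ xs.take (pvCountRun x xs), y = x := by
  intro xs
  induction xs with
  | nil => simp
  | cons z zs ih =>
    by_cases hz : z = x
    · subst hz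
      have hc : pvCountRun z (z :: zs) = pvCountRun z zs + 1 := by simp [pvCountRun]
      rw [hc, List.take_succ_cons]
      intro y hy
      rcases List.mem_cons.mp hy with h | h
      · exact h
      · exact ih y h
    · simp [pvCountRun, hz]

theorem pvCountRun_drop (x : Int) :
    ∀ (xs : List Int) (h : Int) (t : List Int),
      xs.drop (pvCountRun x xs) = h :: t → h ≠ x := by
  intro xs
  induction xs with
  | nil => intro h t hd; simp [pvCountRun] at hd
  | cons z zs ih =>
    intro h t hd
    by_cases hz : z = x
    · simp only [pvCountRun, hz, ite_true, List.drop_succ_cons] at hd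
      exact ih h t hd
    · simp only [pvCountRun, hz, ite_false, List.drop_zero] at hd
      rw [List.cons.injEq] at hd
      exact hd.1 ▸ hz

theorem pvRunScan_eq (value : Int) :
    ∀ (l : List Int), pvRunScan value l = (List.foldl (pvStepA value) ((0:Int), (0:Int)) l).1 := by
  have key : ∀ (n : Nat) (l : List Int), l.length ≤ n →
      pvRunScan value l = (List.foldl (pvStepA value) ((0:Int), (0:Int)) l).1 := by
    intro n
    induction n with
    | zero =>
      intro l hl
      have hnil : l = [] := List.eq_nil_of_length_eq_zero (Nat.le_zero.mp hl)
      subst hnil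
      simp [pvRunScan]
    | succ n ih =>
      intro l hl
      match l with
      | [] => simp [pvRunScan]
      | x :: xs =>
        have hk := pvCountRun_le x xs
        set k := pvCountRun x xs with hkdef
        have hlenxs : xs.length ≤ n := by simpa using Nat.lt_succ_iff.mp (Nat.lt_of_lt_of_le (by simp) hl)
        have hih : pvRunScan value (xs.drop k) =
            (List.foldl (pvStepA value) ((0:Int), (0:Int)) (xs.drop k)).1 := by
          apply ih
          have : (xs.drop k).length ≤ xs.length := by simp
          omega
        have hscan : pvRunScan value (x :: xs)
            = (if x = value ∧ 4 ≤ k + 1 then (1:Int) else 0) + pvRunScan value (xs.drop k) := by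
          simp only [pvRunScan, ← hkdef, Nat.add_sub_cancel]
        have hlen : (xs.take k).length = k := by simp; omega
        have hsplit : xs = xs.take k ++ xs.drop k := (List.take_append_drop k xs).symm
        have hcons : x :: xs = (x :: xs.take k) ++ xs.drop k := by
          rw [List.cons_append]; exact congrArg (x :: ·) hsplit
        by_cases hx : x = value
        · subst hx
          have hrun : ∀ y ∈ x :: xs.take k, y = x := by
            intro y hy
            rcases List.mem_cons.mp hy with h | h
            · exact h
            · exact pvCountRun_take x xs y h
          rw [hscan, hih, hcons, pvFoldl_run x _ hrun]
          have hlen2 : (((x :: xs.take k).length : Nat) : Int) = (k : Int) + 1 := by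
            simp [hlen]
          rw [hlen2]
          have hiff : ((0:ℤ) < 4 ∧ 4 ≤ 0 + ((k:ℤ) + 1)) ↔ (x = x ∧ 4 ≤ k + 1) := by
            constructor
            · intro hh; exact ⟨rfl, by omega⟩
            · intro hh; have := hh.2; exact ⟨by norm_num, by omega⟩
          rcases hrest : xs.drop k with _ | ⟨h, t⟩
          · simp only [List.foldl_nil, hiff]
            split_ifs <;> norm_num
          · have hne : h ≠ x := pvCountRun_drop x xs h t hrest
            conv_rhs => rw [pvFoldl_reset x h t hne, pvFoldl_fst_shift]
            simp only [hiff]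
            split_ifs <;> ring
        · have hnv : ∀ y ∈ x :: xs.take k, y ≠ value := by
            intro y hy
            rcases List.mem_cons.mp hy with h | h
            · exact h ▸ hx
            · exact (pvCountRun_take x xs y h) ▸ hx
          rw [hscan, hih, hcons, List.cons_append, List.foldl_cons]
          have hstep : pvStepA value ((0:Int), (0:Int)) x = ((0:Int), (0:Int)) := by
            simp [pvStepA, hx]
          rw [hstep, pvFoldl_nonval value _ (fun y hy => hnv y (List.mem_cons_of_mem _ hy))]
          simp [hx]
  intro l
  exact key l.length l le_rfl

-- ===== VERDICT (by name: the statement is the Claim_ definition above) =====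
theorem getdiagonalscore_spec : Claim_equal_getdiagonalscore := by
  intro row column board value _ _
  unfold Spec_getdiagonalscore getdiagonalscore getdiagonalscore_alt
  rw [pvLoopA_eq_foldl, pvRunScan_eq]
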